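-- pv_equiv track=rewrite | github.com/pochiman/AlgoExpert | 03_Coding_Interview_Assessments/Assessment_4/1_Repeated_Matrix_Values/repeated_matrix_values.py | repeatedMatrixValues
-- ===== SOURCE A (Python) =====
-- def repeatedMatrixValues(matrix):
--     valueCounts = initializeCountsOfPotentialValues(matrix)
--
--     for row in range(len(matrix)):
--         for col in range(len(matrix[0])):
--             value = matrix[row][col]
--             correctCountSoFar = row
--             checkAndIncrementValueCount(value, valueCounts, correctCountSoFar)
--
--     for col in range(len(matrix[0])):
--         for row in range(len(matrix)):
--             value = matrix[row][col]
--             correctCountSoFar = len(matrix) + col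
--             checkAndIncrementValueCount(value, valueCounts, correctCountSoFar)
--
--     finalValues = []
--     for value in valueCounts:
--         if valueCounts[value] == len(matrix) + len(matrix[0]):
--             finalValues.append(value)
--
--     return finalValues
--
-- def initializeCountsOfPotentialValues(matrix):
--     valueCounts = {}
--
--     smallerSide = matrix[0]
--     if len(matrix) < len(matrix[0]):
--         smallerSide = map(lambda row: row[0], matrix)
--
--     for value in smallerSide:
--         valueCounts[value] = 0
--
--     return valueCounts
--
-- def checkAndIncrementValueCount(value, valueCounts, correctCountSoFar):
--     if value not in valueCounts:
--         return
--     if valueCounts[value] != correctCountSoFar: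
--         return
--
--     valueCounts[value] += 1
-- ===== SOURCE B (Python) =====
-- def repeatedMatrixValues(matrix):
--     numRows = len(matrix)
--     numCols = len(matrix[0])
--     rowSets = [set(row[:numCols]) for row in matrix]
--     colSets = [set(row[c] for row in matrix) for c in range(numCols)]
--     candidates = matrix[0] if numRows >= numCols else [row[0] for row in matrix]
--     seen = set()
--     result = []
--     for v in candidates:
--         if v in seen:
--             continue
--         seen.add(v)
--         if all(v in rs for rs in rowSets) and all(v in cs for cs in colSets):
--             result.append(v)
--     return result
-- ===== Notes on version B (the rewrite author's own statement) =====
-- stated objective: simpler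
-- what changed: Replaces A's stateful dict of streak counters incremented across two nested index sweeps with precomputed row/column sets and one ordered dedup pass over the candidate side testing membership in every set.
import Mathlib
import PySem

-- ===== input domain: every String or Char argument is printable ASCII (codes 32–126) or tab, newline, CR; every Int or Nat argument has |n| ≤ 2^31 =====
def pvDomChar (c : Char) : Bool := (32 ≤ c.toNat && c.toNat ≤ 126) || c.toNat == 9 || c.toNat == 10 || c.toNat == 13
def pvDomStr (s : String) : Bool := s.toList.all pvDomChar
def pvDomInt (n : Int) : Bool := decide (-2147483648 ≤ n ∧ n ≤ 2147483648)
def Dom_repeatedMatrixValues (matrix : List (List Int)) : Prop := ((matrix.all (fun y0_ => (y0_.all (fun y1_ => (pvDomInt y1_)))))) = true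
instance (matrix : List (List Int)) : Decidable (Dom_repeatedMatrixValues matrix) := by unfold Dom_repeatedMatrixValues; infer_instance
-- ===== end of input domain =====

-- B replaces A's dict of streak counters driven by two nested index sweeps with
-- precomputed row/column sets and one ordered dedup pass over the candidate side (simpler).

-- ===== PORT A =====
def pvCheckAndIncrement (value : Int) (d : PySem.Dict Int Int) (correct : Int) : PySem.Dict Int Int :=
  if !(d.contains value) then d
  else if d.getD value 0 ≠ correct then d
  else d.insert value (d.getD value 0 + 1)

def pvInitCounts (matrix : List (List Int)) (row0 : List Int) : PySem.Dict Int Int :=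
  let smallerSide : List Int :=
    if (matrix.length : Int) < (row0.length : Int) then
      matrix.map (fun row => PySem.List.pyGetD row 0 0)
    else row0
  smallerSide.foldl (fun d v => d.insert v 0) PySem.Dict.empty

def repeatedMatrixValues (matrix : List (List Int)) : List Int :=
  match matrix with
  | [] => []   -- Python raises IndexError on matrix[0]; excluded by Pre_
  | row0 :: _ =>
    let counts0 := pvInitCounts matrix row0
    let counts1 := (PySem.List.pyRange 0 (matrix.length : Int)).foldl (fun d r =>
      (PySem.List.pyRange 0 (row0.length : Int)).foldl (fun d c =>
        pvCheckAndIncrement (PySem.List.pyGetD (PySem.List.pyGetD matrix r []) c 0) d r) d) counts0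
    let counts2 := (PySem.List.pyRange 0 (row0.length : Int)).foldl (fun d c =>
      (PySem.List.pyRange 0 (matrix.length : Int)).foldl (fun d r =>
        pvCheckAndIncrement (PySem.List.pyGetD (PySem.List.pyGetD matrix r []) c 0) d ((matrix.length : Int) + c)) d) counts1
    counts2.keys.foldl (fun acc v =>
      if counts2.getD v 0 = (matrix.length : Int) + (row0.length : Int) then acc ++ [v] else acc) []

-- ===== PORT B =====
def repeatedMatrixValues_alt (matrix : List (List Int)) : List Int :=
  match matrix with
  | [] => []   -- Python raises IndexError on matrix[0]; excluded by Pre_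
  | row0 :: _ =>
    let numRows : Int := matrix.length
    let numCols : Int := row0.length
    let rowSets := matrix.map (fun row => PySem.Set.ofList (PySem.List.slice row none (some numCols)))
    let colSets := (PySem.List.pyRange 0 numCols).map (fun c =>
      PySem.Set.ofList (matrix.map (fun row => PySem.List.pyGetD row c 0)))
    let candidates := if numRows ≥ numCols then row0 else matrix.map (fun row => PySem.List.pyGetD row 0 0)
    (candidates.foldl (fun st v =>
      if PySem.Set.contains st.1 v then st
      else (PySem.Set.add st.1 v,
            if rowSets.all (fun s => PySem.Set.contains s v) && colSets.all (fun s => PySem.Set.contains s v)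
            then st.2 ++ [v] else st.2))
      ((PySem.Set.empty : PySem.Set Int), ([] : List Int))).2

-- ===== PRECONDITION & SPEC =====
-- Pre_ excludes exactly the inputs on which the Python A raises IndexError: the empty
-- matrix (matrix[0]) and matrices with a row shorter than the first row (matrix[row][col]).
def Pre_repeatedMatrixValues (matrix : List (List Int)) : Prop :=
  matrix ≠ [] ∧ ∀ row ∈ matrix, (matrix.headD []).length ≤ row.length
instance (matrix : List (List Int)) : Decidable (Pre_repeatedMatrixValues matrix) := by unfold Pre_repeatedMatrixValues; infer_instance

def pvWitness_repeatedMatrixValues : List (List Int) := [[1, 2], [2, 1]]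

def Spec_repeatedMatrixValues (matrix : List (List Int)) (out : List Int) : Prop := out = repeatedMatrixValues_alt matrix
instance (matrix : List (List Int)) (out : List Int) : Decidable (Spec_repeatedMatrixValues matrix out) := by unfold Spec_repeatedMatrixValues; infer_instance

-- ===== CLAIM (what is proved, stated in full; the proofs are below) =====
def Claim_equal_repeatedMatrixValues : Prop := ∀ (matrix : List (List Int)), Dom_repeatedMatrixValues matrix → Pre_repeatedMatrixValues matrix → Spec_repeatedMatrixValues matrix (repeatedMatrixValues matrix)

-- ===== LEMMAS AND PROOFS =====

theorem pvCheck_get? (v : Int) (d : PySem.Dict Int Int) (corr k : Int) :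
    (pvCheckAndIncrement v d corr).get? k =
      if k = v ∧ d.get? v = some corr then some (corr + 1) else d.get? k := by
  unfold pvCheckAndIncrement
  rcases hg : d.get? v with _ | c
  · have hc : d.contains v = false := by
      rw [PySem.Dict.contains_eq_isSome_get?, hg]; rfl
    simp [hc]
  · have hc : d.contains v = true := by
      rw [PySem.Dict.contains_eq_isSome_get?, hg]; rfl
    have hgd : d.getD v 0 = c := by rw [PySem.Dict.getD_eq_get?_getD, hg]; rfl
    by_cases hcc : c = corr
    · subst hcc
      simp [hc, hgd, PySem.Dict.get?_insert]
    · have : ¬ (k = v ∧ d.get? v = some corr) := by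
        rintro ⟨-, h2⟩; rw [hg] at h2; exact hcc (by injection h2)
      simp [hc, hgd, hcc]

theorem pvCheck_keys (v : Int) (d : PySem.Dict Int Int) (corr : Int) :
    (pvCheckAndIncrement v d corr).keys = d.keys := by
  unfold pvCheckAndIncrement
  by_cases hc : d.contains v
  · simp only [hc]
    split_ifs
    · rfl
    · rfl
    · exact PySem.Dict.keys_insert_of_contains d _ hc
  · simp [hc]

theorem pvFoldCheck_get? (g : Int → Int) (corr k : Int) (js : List Int) : ∀ d : PySem.Dict Int Int,
    (js.foldl (fun d j => pvCheckAndIncrement (g j) d corr) d).get? k =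
      if d.get? k = some corr ∧ k ∈ js.map g then some (corr + 1) else d.get? k := by
  induction js with
  | nil => intro d; simp
  | cons j rest ih =>
    intro d
    simp only [List.foldl_cons, List.map_cons, List.mem_cons]
    rw [ih]
    rw [pvCheck_get? (g j) d corr k]
    have hne : (corr + 1) ≠ corr := by omega
    by_cases hkv : k = g j
    · by_cases hg : d.get? (g j) = some corr
      · simp [hkv, hg, hne]
      · simp [hkv, hg]
    · simp [hkv]

theorem pvPhase_get? (cell : Int → Int → Int) (co : Int → Int) (k : Int) (js : List Int)
    (is : List Int) : ∀ d : PySem.Dict Int Int,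
    ((is.foldl (fun d i => js.foldl (fun d j => pvCheckAndIncrement (cell i j) d (co i)) d) d).get? k)
      = (d.get? k).map (fun c =>
          is.foldl (fun c i => if c = co i ∧ k ∈ js.map (cell i) then co i + 1 else c) c) := by
  induction is with
  | nil => intro d; cases hd : d.get? k <;> simp [hd]
  | cons i rest ih =>
    intro d
    simp only [List.foldl_cons]
    rw [ih]
    rw [pvFoldCheck_get? (cell i) (co i) k js d]
    rcases hd : d.get? k with _ | c
    · simp [hd]
    · by_cases h : c = co i ∧ k ∈ js.map (cell i)
      · simp [h.1, h.2]
      · have h2 : ¬ (some c = some (co i) ∧ k ∈ js.map (cell i)) := by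
          rintro ⟨h1, hm⟩; exact h ⟨Option.some.inj h1, hm⟩
        simp only [Option.map]
        rw [if_neg h, if_neg h2]

theorem pvPhase_keys (cell : Int → Int → Int) (co : Int → Int) (js : List Int)
    (is : List Int) : ∀ d : PySem.Dict Int Int,
    (is.foldl (fun d i => js.foldl (fun d j => pvCheckAndIncrement (cell i j) d (co i)) d) d).keys = d.keys := by
  have inner : ∀ (i : Int) (d : PySem.Dict Int Int),
      (js.foldl (fun d j => pvCheckAndIncrement (cell i j) d (co i)) d).keys = d.keys := by
    intro i
    induction js with
    | nil => intro d; rfl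
    | cons j rest ih => intro d; simp only [List.foldl_cons]; rw [ih, pvCheck_keys]
  induction is with
  | nil => intro d; rfl
  | cons i rest ih => intro d; simp only [List.foldl_cons]; rw [ih, inner]

theorem pvStreak_le (Q : Int → Prop) [DecidablePred Q] (off : Int) : ∀ (n : Nat), ∀ start : Int, start ≤ off →
    (PySem.List.pyRange 0 (n : Int)).foldl (fun c i => if c = off + i ∧ Q i then off + i + 1 else c) start ≤ off + n := by
  intro n
  induction n with
  | zero => intro start h; simpa using h
  | succ n ih =>
    intro start h
    have hc : ((n + 1 : Nat) : Int) = (n : Int) + 1 := by push_cast; ring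
    rw [hc, PySem.List.pyRange_one_succ_right (by positivity), List.foldl_append]
    simp only [List.foldl_cons, List.foldl_nil]
    have hv := ih start h
    split_ifs with hcond
    · omega
    · omega

theorem pvStreak_eq_iff (Q : Int → Prop) [DecidablePred Q] (off : Int) : ∀ (n : Nat), ∀ start : Int, start ≤ off →
    ((PySem.List.pyRange 0 (n : Int)).foldl (fun c i => if c = off + i ∧ Q i then off + i + 1 else c) start = off + n
      ↔ (start = off ∧ ∀ i : Int, 0 ≤ i → i < (n : Int) → Q i)) := by
  intro n
  induction n with
  | zero =>
    intro start h
    have h0 : PySem.List.pyRange (0:Int) ((0:Nat):Int) = [] := by decide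
    rw [h0]
    simp only [List.foldl_nil]
    constructor
    · intro he; exact ⟨by omega, fun i h0 h1 => absurd h1 (by omega)⟩
    · rintro ⟨he, -⟩; omega
  | succ n ih =>
    intro start h
    have hc : ((n + 1 : Nat) : Int) = (n : Int) + 1 := by push_cast; ring
    rw [hc, PySem.List.pyRange_one_succ_right (by positivity), List.foldl_append]
    simp only [List.foldl_cons, List.foldl_nil]
    have hle := pvStreak_le Q off n start h
    have hiff := ih start h
    constructor
    · intro he
      split_ifs at he with hcond
      · obtain ⟨h1, h2⟩ := hcond
        obtain ⟨hs, hall⟩ := hiff.mp h1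
        refine ⟨hs, fun i h0 h1 => ?_⟩
        by_cases hin : i < (n : Int)
        · exact hall i h0 hin
        · have : i = (n : Int) := by omega
          rwa [this]
      · omega
    · rintro ⟨hs, hall⟩
      have hfull : (PySem.List.pyRange 0 (n : Int)).foldl (fun c i => if c = off + i ∧ Q i then off + i + 1 else c) start = off + n :=
        hiff.mpr ⟨hs, fun i h0 h1 => hall i h0 (by omega)⟩
      rw [hfull, if_pos ⟨rfl, hall (n : Int) (by positivity) (by omega)⟩]
      omega

theorem pvInitFold_get? (l : List Int) (k : Int) : ∀ d : PySem.Dict Int Int,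
    (l.foldl (fun d v => d.insert v 0) d).get? k = if k ∈ l then some 0 else d.get? k := by
  induction l with
  | nil => intro d; simp
  | cons v rest ih =>
    intro d
    simp only [List.foldl_cons, List.mem_cons]
    rw [ih]
    by_cases hkv : k = v
    · by_cases hm : k ∈ rest <;> simp [hkv, hm, PySem.Dict.get?_insert]
    · by_cases hm : k ∈ rest <;> simp [hkv, hm, PySem.Dict.get?_insert]

theorem pvMapRangeTake (l : List Int) (n : Nat) (h : n ≤ l.length) :
    (PySem.List.pyRange 0 (n : Int)).map (fun c => PySem.List.pyGetD l c 0) = l.take n := by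
  induction n with
  | zero => simp [PySem.List.pyRange_zero_nat]
  | succ n ih =>
    have hc : ((n + 1 : Nat) : Int) = (n : Int) + 1 := by push_cast; ring
    rw [hc, PySem.List.pyRange_one_succ_right (by positivity), List.map_append]
    rw [ih (by omega)]
    have hn : n < l.length := by omega
    rw [List.take_add_one]
    have h1 : PySem.List.pyGetD l (n : Int) 0 = l[n] :=
      PySem.List.pyGetD_eq_getElem l 0 (by positivity) (by exact_mod_cast hn)
    simp [h1, List.getElem?_eq_getElem hn]

theorem pvColVals (matrix : List (List Int)) (c : Int) :
    (PySem.List.pyRange 0 (matrix.length : Int)).map (fun r => PySem.List.pyGetD (PySem.List.pyGetD matrix r []) c 0)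
      = matrix.map (fun row => PySem.List.pyGetD row c 0) := by
  conv_rhs => rw [← PySem.List.map_pyGetD_pyRange_zero' matrix []]
  rw [List.map_map]
  rfl

def pvNewList (p : Int → Bool) (l : List Int) (seen : PySem.Set Int) : List Int :=
  match l with
  | [] => []
  | v :: rest =>
    if PySem.Set.contains seen v then pvNewList p rest seen
    else (if p v then [v] else []) ++ pvNewList p rest (PySem.Set.add seen v)

theorem pvBLoop (p : Int → Bool) (l : List Int) : ∀ (seen : PySem.Set Int) (acc : List Int),
    (l.foldl (fun st v =>
        if PySem.Set.contains st.1 v then st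
        else (PySem.Set.add st.1 v, if p v then st.2 ++ [v] else st.2)) (seen, acc)).2
      = acc ++ pvNewList p l seen := by
  induction l with
  | nil => intro seen acc; simp [pvNewList]
  | cons v rest ih =>
    intro seen acc
    simp only [List.foldl_cons, pvNewList]
    by_cases hc : PySem.Set.contains seen v
    · simp only [hc, if_pos]
      exact ih seen acc
    · simp only [hc, if_neg, Bool.false_eq_true, ite_false]
      rw [ih]
      by_cases hp : p v <;> simp [hp]

theorem pvAddContains (seen : PySem.Set Int) (v y : Int) :
    PySem.Set.contains (PySem.Set.add seen v) y = (PySem.Set.contains seen y || (y == v)) := by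
  by_cases hs : y ∈ seen
  · have h1 : PySem.Set.contains seen y = true := (PySem.Set.contains_iff _ _).mpr hs
    have h2 : PySem.Set.contains (PySem.Set.add seen v) y = true :=
      (PySem.Set.contains_iff _ _).mpr ((PySem.Set.mem_add _ _ _).mpr (Or.inl hs))
    rw [h1, h2, Bool.true_or]
  · have h1 : PySem.Set.contains seen y = false :=
      Bool.eq_false_iff.mpr (fun ht => hs ((PySem.Set.contains_iff _ _).mp ht))
    rw [h1, Bool.false_or]
    by_cases hyv : y = v
    · subst hyv
      have h2 : PySem.Set.contains (PySem.Set.add seen y) y = true :=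
        (PySem.Set.contains_iff _ _).mpr ((PySem.Set.mem_add _ _ _).mpr (Or.inr rfl))
      rw [h2, beq_self_eq_true]
    · have h2 : PySem.Set.contains (PySem.Set.add seen v) y = false :=
      Bool.eq_false_iff.mpr (fun ht =>
        ((PySem.Set.mem_add _ _ _).mp ((PySem.Set.contains_iff _ _).mp ht)).elim hs hyv)
      rw [h2, beq_eq_false_iff_ne.mpr hyv]

theorem pvNewList_eq (p : Int → Bool) (l : List Int) : ∀ seen : PySem.Set Int,
    pvNewList p l seen = ((PySem.Set.ofList l).filter (fun y => !(PySem.Set.contains seen y))).filter p := by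
  induction l with
  | nil => intro seen; simp [pvNewList, PySem.Set.ofList_nil]
  | cons v rest ih =>
    intro seen
    rw [pvNewList, PySem.Set.ofList_cons, PySem.Set.discard]
    by_cases hc : PySem.Set.contains seen v
    · rw [if_pos hc, ih seen]
      simp only [List.filter_cons, hc, Bool.not_true, Bool.false_eq_true, ite_false,
        List.filter_filter]
      apply List.filter_congr
      intro y hy
      cases hyv : (y == v)
      · simp [hyv]
      · have hyv' : y = v := by simpa using hyv
        subst hyv'
        rw [hc]
        simp
    · rw [if_neg hc, ih (PySem.Set.add seen v)]
      simp only [List.filter_cons, hc, Bool.not_false, ite_true, List.filter_filter]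
      have htail : (PySem.Set.ofList rest).filter (fun a => p a && !PySem.Set.contains (PySem.Set.add seen v) a)
          = (PySem.Set.ofList rest).filter (fun a => p a && (!PySem.Set.contains seen a && !(a == v))) := by
        apply List.filter_congr
        intro y hy
        rw [pvAddContains]
        cases h1 : PySem.Set.contains seen y <;> cases h2 : (y == v) <;> simp
      by_cases hp : p v
      · simp only [hp, ite_true]
        rw [htail]
        rfl
      · simp only [hp, Bool.false_eq_true, ite_false]
        rw [htail]
        rfl

def pvSmaller (row0 : List Int) (rest : List (List Int)) : List Int :=
  if (((row0 :: rest : List (List Int))).length : Int) < (row0.length : Int) then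
    (row0 :: rest).map (fun row => PySem.List.pyGetD row 0 0)
  else row0

def pvOK (row0 : List Int) (rest : List (List Int)) (k : Int) : Bool :=
  decide ((∀ row ∈ (row0 :: rest), k ∈ row.take row0.length) ∧
    (∀ c : Int, 0 ≤ c → c < (row0.length : Int) →
      k ∈ (row0 :: rest).map (fun row => PySem.List.pyGetD row c 0)))

theorem pvB_eq (row0 : List Int) (rest : List (List Int)) :
    repeatedMatrixValues_alt (row0 :: rest) = (PySem.Set.ofList (pvSmaller row0 rest)).filter (pvOK row0 rest) := by
  simp only [repeatedMatrixValues_alt]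
  rw [pvBLoop]
  rw [pvNewList_eq]
  have hce : ∀ y : Int, PySem.Set.contains (PySem.Set.empty : PySem.Set Int) y = false := fun y => rfl
  simp only [hce, Bool.not_false, List.filter_true, List.nil_append]
  have hcand : (if ((row0 :: rest : List (List Int)).length : Int) ≥ (row0.length : Int) then row0
      else (row0 :: rest).map (fun row => PySem.List.pyGetD row 0 0)) = pvSmaller row0 rest := by
    unfold pvSmaller
    by_cases hlt : ((row0 :: rest : List (List Int)).length : Int) < (row0.length : Int)
    · rw [if_neg (by omega), if_pos hlt]
    · rw [if_pos (by omega), if_neg hlt]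
  rw [hcand]
  apply List.filter_congr
  intro k hk
  rw [Bool.eq_iff_iff]
  unfold pvOK
  have hslice : ∀ xs : List Int, PySem.List.slice xs none (some (row0.length : Int)) = xs.take row0.length := by
    intro xs
    rw [PySem.List.slice_to _ (Int.natCast_nonneg _), Int.toNat_natCast]
  simp only [hslice, Bool.and_eq_true, List.all_eq_true, decide_eq_true_eq, List.mem_map,
    PySem.Set.contains_iff, PySem.Set.mem_ofList, PySem.List.mem_pyRange_one]
  constructor
  · rintro ⟨h1, h2⟩
    constructor
    · intro row hrow
      exact (PySem.Set.mem_ofList _ _).mp (h1 _ ⟨row, hrow, rfl⟩)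
    · intro c hc0 hc1
      have := h2 _ ⟨c, ⟨hc0, hc1⟩, rfl⟩
      rwa [PySem.Set.mem_ofList, List.mem_map] at this
  · rintro ⟨h1, h2⟩
    constructor
    · rintro s ⟨row, hrow, rfl⟩
      exact (PySem.Set.mem_ofList _ _).mpr (h1 row hrow)
    · rintro s ⟨c, ⟨hc0, hc1⟩, rfl⟩
      rw [PySem.Set.mem_ofList, List.mem_map]
      exact h2 c hc0 hc1

theorem pvFinalFold (d : PySem.Dict Int Int) (T : Int) :
    d.keys.foldl (fun acc v => if d.getD v 0 = T then acc ++ [v] else acc) [] =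
      d.keys.filter (fun v => decide (d.getD v 0 = T)) := by
  have h1 : d.keys.foldl (fun acc v => if d.getD v 0 = T then acc ++ [v] else acc) []
      = d.keys.foldl (fun acc v => if decide (d.getD v 0 = T) = true then acc ++ [v] else acc) [] := by
    apply PySem.List.foldl_congr_mem
    intro acc x hx
    simp
  rw [h1]
  rw [PySem.List.foldl_append_if (fun v => decide (d.getD v 0 = T)) (fun v => v)]
  simp

theorem pvA_eq (row0 : List Int) (rest : List (List Int))
    (h : ∀ row ∈ (row0 :: rest), row0.length ≤ row.length) :
    repeatedMatrixValues (row0 :: rest) = (PySem.Set.ofList (pvSmaller row0 rest)).filter (pvOK row0 rest) := by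
  simp only [repeatedMatrixValues, pvInitCounts]
  refine Eq.trans (pvFinalFold _ _) ?_
  rw [pvPhase_keys, pvPhase_keys, PySem.Dict.keys_foldl_insert, PySem.Dict.keys_empty,
    PySem.Set.update_nil_left]
  have hS : (if (((row0 :: rest : List (List Int))).length : Int) < (row0.length : Int) then
      (row0 :: rest).map (fun row => PySem.List.pyGetD row 0 0) else row0) = pvSmaller row0 rest := rfl
  rw [hS]
  apply List.filter_congr
  intro k hk
  have hkS : k ∈ pvSmaller row0 rest := (PySem.Set.mem_ofList _ _).mp hk
  rw [PySem.Dict.getD_eq_get?_getD]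
  rw [pvPhase_get?]
  rw [pvPhase_get?]
  rw [pvInitFold_get?]
  rw [if_pos hkS]
  simp only [Option.map, Option.getD]
  rw [Bool.eq_iff_iff]
  unfold pvOK
  simp only [decide_eq_true_eq]
  have hrowsle := pvStreak_le (fun i => k ∈ List.map
      (fun c => PySem.List.pyGetD (PySem.List.pyGetD (row0 :: rest) i []) c 0)
      (PySem.List.pyRange 0 (row0.length : Int))) 0 (row0 :: rest).length 0 le_rfl
  simp only [zero_add] at hrowsle
  have hrows := pvStreak_eq_iff (fun i => k ∈ List.map
      (fun c => PySem.List.pyGetD (PySem.List.pyGetD (row0 :: rest) i []) c 0)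
      (PySem.List.pyRange 0 (row0.length : Int))) 0 (row0 :: rest).length 0 le_rfl
  simp only [zero_add] at hrows
  refine Iff.trans (pvStreak_eq_iff _ _ _ _ hrowsle) ?_
  rw [hrows]
  simp only [pvColVals, eq_self_iff_true, true_and]
  refine and_congr ?_ Iff.rfl
  constructor
  · intro hA row hrow
    obtain ⟨n, hn, rfl⟩ := List.mem_iff_getElem.mp hrow
    have h1 := hA (n : Int) (by positivity) (by exact_mod_cast hn)
    rw [PySem.List.pyGetD_natCast, List.getD_eq_getElem _ _ hn] at h1
    rwa [pvMapRangeTake _ _ (h _ (List.getElem_mem hn))] at h1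
  · intro hB r h0 h1
    have hn : r.toNat < (row0 :: rest).length := by omega
    rw [PySem.List.pyGetD_of_nonneg _ _ h0, List.getD_eq_getElem _ _ hn]
    rw [pvMapRangeTake _ _ (h _ (List.getElem_mem hn))]
    exact hB _ (List.getElem_mem hn)

-- ===== VERDICT (by name: the statement is the Claim_ definition above) =====
theorem repeatedMatrixValues_spec : Claim_equal_repeatedMatrixValues := by
  unfold Claim_equal_repeatedMatrixValues
  intro matrix hdom hpre
  unfold Spec_repeatedMatrixValues
  match matrix with
  | [] => exact absurd rfl hpre.1
  | row0 :: rest =>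
    have hlen : ∀ row ∈ (row0 :: rest), row0.length ≤ row.length := by
      intro row hrow
      have := hpre.2 row hrow
      simpa using this
    rw [pvA_eq row0 rest hlen, pvB_eq row0 rest]
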